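-- pv_equiv track=rewrite | github.com/ElStevenn/arvitrage_bot_api | .history/app/bitget_layer_20240927124220.py | calculate_api_calls
-- ===== SOURCE A (Python) =====
-- def calculate_api_calls(start_time: int, end_time: int, granularity_ms: int):
--     time_diff = end_time - start_time
--     total_candles = time_diff // granularity_ms
--     max_candles_per_call = 1000
--
--     calls = []
--     current_start_time = start_time
--
--     while total_candles > 0:
--         candles_in_this_call = min(total_candles, max_candles_per_call)
--         current_end_time = current_start_time + (candles_in_this_call * granularity_ms)
--
--         calls.append({
--             "start_time": current_start_time,
--             "end_time": current_end_time,
--             "candles": candles_in_this_call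
--         })
--
--         current_start_time = current_end_time + granularity_ms
--         total_candles -= candles_in_this_call
--
--     return calls
-- ===== SOURCE B (Python) =====
-- def calculate_api_calls(start_time: int, end_time: int, granularity_ms: int):
--     total_candles = (end_time - start_time) // granularity_ms
--     if total_candles <= 0:
--         return []
--     num_full, remainder = divmod(total_candles, 1000)
--     calls = [
--         {
--             "start_time": start_time + i * 1001 * granularity_ms,
--             "end_time": start_time + i * 1001 * granularity_ms + 1000 * granularity_ms,
--             "candles": 1000,
--         }
--         for i in range(num_full)
--     ]
--     if remainder > 0:
--         s = start_time + num_full * 1001 * granularity_ms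
--         calls.append({"start_time": s, "end_time": s + remainder * granularity_ms, "candles": remainder})
--     return calls
-- ===== Notes on version B (the rewrite author's own statement) =====
-- stated objective: alternative
-- what changed: B derives each window from a closed index formula (start_time + i*1001*granularity_ms) via divmod(total,1000) and a comprehension, instead of A's while loop threading current_start_time and decrementing total_candles.
import Mathlib
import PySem

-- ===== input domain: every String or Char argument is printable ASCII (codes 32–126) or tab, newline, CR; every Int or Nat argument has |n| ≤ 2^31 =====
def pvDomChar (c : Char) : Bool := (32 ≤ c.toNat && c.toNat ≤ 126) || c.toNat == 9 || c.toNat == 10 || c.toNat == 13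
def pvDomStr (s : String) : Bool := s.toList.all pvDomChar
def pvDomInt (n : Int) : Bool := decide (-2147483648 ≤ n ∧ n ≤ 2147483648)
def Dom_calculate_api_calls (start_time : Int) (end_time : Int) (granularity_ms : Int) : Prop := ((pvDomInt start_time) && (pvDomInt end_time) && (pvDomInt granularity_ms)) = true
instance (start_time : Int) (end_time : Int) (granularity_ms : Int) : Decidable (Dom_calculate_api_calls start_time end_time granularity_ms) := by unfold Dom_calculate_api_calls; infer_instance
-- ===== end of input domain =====

-- B computes each window from a closed index formula via divmod(total,1000) instead of A's
-- state-threading while loop; equally fast, different decomposition (objective: alternative).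

-- ===== PORT A =====
-- A's while loop: state (current_start_time, total_candles), appends one window per step.
def pvALoop (granularity_ms : Int) (current_start_time : Int) (total_candles : Int) :
    List (List (String × Int)) :=
  if _h : total_candles > 0 then
    let candles_in_this_call := min total_candles 1000
    let current_end_time := current_start_time + candles_in_this_call * granularity_ms
    [("start_time", current_start_time), ("end_time", current_end_time),
     ("candles", candles_in_this_call)] ::
      pvALoop granularity_ms (current_end_time + granularity_ms)
        (total_candles - candles_in_this_call)
  else []
termination_by total_candles.toNat
decreasing_by omega

def calculate_api_calls (start_time : Int) (end_time : Int) (granularity_ms : Int) : List (List (String × Int)) :=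
  let time_diff := end_time - start_time
  let total_candles := PySem.Int.floordiv time_diff granularity_ms
  pvALoop granularity_ms start_time total_candles

-- ===== PORT B =====
def pvBWin (start_time : Int) (granularity_ms : Int) (i : Int) : List (String × Int) :=
  [("start_time", start_time + i * 1001 * granularity_ms),
   ("end_time", start_time + i * 1001 * granularity_ms + 1000 * granularity_ms),
   ("candles", 1000)]

def calculate_api_calls_alt (start_time : Int) (end_time : Int) (granularity_ms : Int) : List (List (String × Int)) :=
  let total_candles := PySem.Int.floordiv (end_time - start_time) granularity_ms
  if total_candles ≤ 0 then []
  else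
    let num_full := PySem.Int.floordiv total_candles 1000
    let remainder := PySem.Int.mod total_candles 1000
    let calls := (PySem.List.pyRange 0 num_full 1).map (pvBWin start_time granularity_ms)
    if remainder > 0 then
      let s := start_time + num_full * 1001 * granularity_ms
      calls ++ [[("start_time", s), ("end_time", s + remainder * granularity_ms),
                 ("candles", remainder)]]
    else calls

-- ===== PRECONDITION & SPEC =====
-- Pre_ excludes only granularity_ms = 0, where Python A raises ZeroDivisionError.
def Pre_calculate_api_calls (start_time : Int) (end_time : Int) (granularity_ms : Int) : Prop :=
  granularity_ms ≠ 0
instance (start_time : Int) (end_time : Int) (granularity_ms : Int) : Decidable (Pre_calculate_api_calls start_time end_time granularity_ms) := by unfold Pre_calculate_api_calls; infer_instance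
def pvWitness_calculate_api_calls : Int × Int × Int := (0, 5000, 2)

def Spec_calculate_api_calls (start_time : Int) (end_time : Int) (granularity_ms : Int) (out : List (List (String × Int))) : Prop := out = calculate_api_calls_alt start_time end_time granularity_ms
instance (start_time : Int) (end_time : Int) (granularity_ms : Int) (out : List (List (String × Int))) : Decidable (Spec_calculate_api_calls start_time end_time granularity_ms out) := by unfold Spec_calculate_api_calls; infer_instance

-- ===== CLAIM (what is proved, stated in full; the proofs are below) =====
def Claim_equal_calculate_api_calls : Prop := ∀ (start_time : Int) (end_time : Int) (granularity_ms : Int), Dom_calculate_api_calls start_time end_time granularity_ms → Pre_calculate_api_calls start_time end_time granularity_ms → Spec_calculate_api_calls start_time end_time granularity_ms (calculate_api_calls start_time end_time granularity_ms)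

-- ===== LEMMAS AND PROOFS =====

-- B's body generalized over an arbitrary start and total (proof helper).
def pvBCore (g st t : Int) : List (List (String × Int)) :=
  if t ≤ 0 then []
  else
    let nf := PySem.Int.floordiv t 1000
    let rem := PySem.Int.mod t 1000
    let calls := (PySem.List.pyRange 0 nf 1).map (pvBWin st g)
    if rem > 0 then
      calls ++ [[("start_time", st + nf * 1001 * g),
                 ("end_time", st + nf * 1001 * g + rem * g), ("candles", rem)]]
    else calls

lemma pvBWin_shift (st g i : Int) : pvBWin st g (1 + i) = pvBWin (st + 1001 * g) g i := by
  simp only [pvBWin, List.cons.injEq, Prod.mk.injEq, true_and, and_true]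
  refine ⟨by ring, by ring⟩

lemma pvRange_map_shift (st g m : Int) :
    (PySem.List.pyRange 1 (m + 1) 1).map (pvBWin st g)
      = (PySem.List.pyRange 0 m 1).map (pvBWin (st + 1001 * g) g) := by
  apply List.ext_getElem
  · simp [PySem.List.length_pyRange_one]
  · intro i h1 h2
    simp only [List.getElem_map, PySem.List.getElem_pyRange_one, zero_add]
    exact pvBWin_shift st g i

lemma pvBCore_step (g st t : Int) (h : t > 1000) :
    pvBCore g st t = pvBWin st g 0 :: pvBCore g (st + 1001 * g) (t - 1000) := by
  have h1 : PySem.Int.floordiv t 1000 = PySem.Int.floordiv (t - 1000) 1000 + 1 := by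
    rw [PySem.Int.floordiv_eq_ediv_of_pos (by norm_num),
        PySem.Int.floordiv_eq_ediv_of_pos (by norm_num)]
    omega
  have h2 : PySem.Int.mod t 1000 = PySem.Int.mod (t - 1000) 1000 := by
    rw [PySem.Int.mod_eq_emod_of_pos (by norm_num),
        PySem.Int.mod_eq_emod_of_pos (by norm_num)]
    omega
  have hm : 0 ≤ PySem.Int.floordiv (t - 1000) 1000 := by
    rw [PySem.Int.floordiv_eq_ediv_of_pos (by norm_num)]
    omega
  unfold pvBCore
  rw [if_neg (show ¬ t ≤ 0 by omega), if_neg (show ¬ t - 1000 ≤ 0 by omega), h1, h2]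
  dsimp only
  rw [PySem.List.pyRange_one_cons (by omega), List.map_cons, zero_add,
      pvRange_map_shift st g _]
  split_ifs with hr
  · have ht : st + (PySem.Int.floordiv (t - 1000) 1000 + 1) * 1001 * g
        = st + 1001 * g + PySem.Int.floordiv (t - 1000) 1000 * 1001 * g := by ring
    rw [List.cons_append, ht]
  · rfl

lemma pvALoop_eq_core (g : Int) : ∀ (n : Nat) (t st : Int), t.toNat = n → pvALoop g st t = pvBCore g st t := by
  intro n
  induction n using Nat.strong_induction_on with
  | _ n ih =>
    intro t st hn
    rw [pvALoop]
    by_cases h : t > 0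
    · rw [dif_pos h]
      by_cases h2 : t ≤ 1000
      · have hmin : min t 1000 = t := by omega
        simp only [hmin]
        rw [pvALoop, dif_neg (by omega)]
        unfold pvBCore
        rw [if_neg (by omega)]
        dsimp only
        by_cases h3 : t = 1000
        · subst h3
          rw [show PySem.Int.floordiv (1000:Int) 1000 = 1 from by decide,
              show PySem.Int.mod (1000:Int) 1000 = 0 from by decide,
              if_neg (by norm_num),
              show PySem.List.pyRange 0 1 1 = [0] from by decide]
          simp [pvBWin]
        · have hf : PySem.Int.floordiv t 1000 = 0 := by
            rw [PySem.Int.floordiv_eq_ediv_of_pos (by norm_num)]; omega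
          have hr : PySem.Int.mod t 1000 = t := by
            rw [PySem.Int.mod_eq_emod_of_pos (by norm_num)]; omega
          rw [hf, hr, if_pos h]
          simp [PySem.List.pyRange_one_eq_nil]
      · have hmin : min t 1000 = (1000 : Int) := by omega
        simp only [hmin]
        rw [ih (t - 1000).toNat (by omega) _ _ rfl]
        rw [pvBCore_step g st t (by omega)]
        simp only [pvBWin, zero_mul, mul_comm]
        ring_nf
    · rw [dif_neg h]
      unfold pvBCore
      rw [if_pos (by omega)]

theorem calculate_api_calls_spec : Claim_equal_calculate_api_calls := by
  intro st et g _ _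
  show calculate_api_calls st et g = calculate_api_calls_alt st et g
  unfold calculate_api_calls calculate_api_calls_alt
  rw [pvALoop_eq_core g _ _ _ rfl]
  rfl
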